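-- pv_equiv track=rewrite | github.com/horiso0921/CompetitivePrograming | ICPC/Past-JP/2017/2017c.py | check
-- ===== SOURCE A (Python) =====
-- def check(ry, rx, x, y, f):
--     tmpmin = float("inf")
--     for yi in range(ry):
--         tmpmin = min(tmpmin, f[yi + y][x])
--     for xi in range(rx):
--         tmpmin = min(tmpmin, f[y][xi + x])
--     for yi in range(ry):
--         tmpmin = min(tmpmin, f[yi + y][x + rx - 1])
--     for xi in range(rx):
--         tmpmin = min(tmpmin, f[ry - 1 + y][x + xi])
--     res = 0
--
--     for yi in range(y + 1, y + ry - 1):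
--         for xi in range(x + 1, x + rx - 1):
--             res += tmpmin-f[yi][xi]
--             if f[yi][xi] >= tmpmin:
--                 return 0
--     return res
-- ===== SOURCE B (Python) =====
-- def check(ry, rx, x, y, f):
--     # Single scan over the whole ry x rx rectangle with border/interior
--     # classification and four accumulators (border min, interior max, interior
--     # sum, interior count), finished by the closed form bmin*cnt - total.
--     if ry <= 0 or rx <= 0:
--         return 0
--     bmin = None
--     imax = None
--     total = 0
--     cnt = 0
--     for yi in range(y, y + ry):
--         for xi in range(x, x + rx):
--             v = f[yi][xi]
--             if yi == y or yi == y + ry - 1 or xi == x or xi == x + rx - 1: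
--                 bmin = v if bmin is None else min(bmin, v)
--             else:
--                 imax = v if imax is None else max(imax, v)
--                 total += v
--                 cnt += 1
--     if imax is not None and imax >= bmin:
--         return 0
--     return bmin * cnt - total
-- ===== Notes on version B (the rewrite author's own statement) =====
-- stated objective: alternative
-- what changed: A walks the four border edges separately to build the min and then scans the interior with a fused accumulate-and-early-exit loop; B makes one row-major scan of the whole rectangle, classifying each cell as border or interior while maintaining four accumulators (border min, interior max, interior sum, interior count), and finishes with the closed form bmin*cnt - total guarded by imax >= bmin instead of an early exit.
import Mathlib
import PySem

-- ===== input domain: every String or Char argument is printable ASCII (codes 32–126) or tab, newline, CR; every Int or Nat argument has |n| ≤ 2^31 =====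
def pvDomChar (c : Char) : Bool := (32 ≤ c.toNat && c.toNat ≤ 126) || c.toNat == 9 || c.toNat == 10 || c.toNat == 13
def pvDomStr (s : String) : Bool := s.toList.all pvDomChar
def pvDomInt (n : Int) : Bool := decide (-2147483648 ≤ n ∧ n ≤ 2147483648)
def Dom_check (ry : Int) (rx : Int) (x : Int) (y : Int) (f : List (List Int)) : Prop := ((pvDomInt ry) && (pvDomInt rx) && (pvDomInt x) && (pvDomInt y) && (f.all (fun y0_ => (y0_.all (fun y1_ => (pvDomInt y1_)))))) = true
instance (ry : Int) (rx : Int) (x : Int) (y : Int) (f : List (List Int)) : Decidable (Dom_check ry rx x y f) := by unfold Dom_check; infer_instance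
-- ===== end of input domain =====

-- B replaces A's four border-edge loops plus fused accumulate-and-early-exit interior scan by a
-- single row-major scan of the whole rectangle that classifies each cell border/interior while
-- maintaining four accumulators (border min, interior max, interior sum, interior count) and
-- finishes with the closed form bmin*cnt - total (objective: alternative).
-- Pre_check is exactly the set of inputs on which A returns (all its border accesses are
-- in range, Python negative-index wraparound included; the interior accesses are implied).


-- shared Python-indexing helper: f[i][j] (inside Pre_ both indices are in range, so the
-- `.getD` defaults are never the value used)
def pvCell (f : List (List Int)) (i j : Int) : Int :=
  (PySem.List.pyGet? ((PySem.List.pyGet? f i).getD []) j).getD 0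

-- min(tmpmin, v) with tmpmin starting at float("inf"): none plays inf
def pvOMin (m : Option Int) (v : Int) : Option Int :=
  match m with
  | none => some v
  | some a => some (min a v)

-- ===== PORT A =====
-- the fused interior loop: res += tmpmin - f[yi][xi]; early `return 0` is `none`
def pvInnerA (tm : Int) (f : List (List Int)) (yi : Int) : List Int → Int → Option Int
  | [], res => some res
  | xi :: rest, res =>
    let v := pvCell f yi xi
    if tm ≤ v then none else pvInnerA tm f yi rest (res + (tm - v))

def pvOuterA (tm : Int) (f : List (List Int)) (x rx : Int) : List Int → Int → Option Int
  | [], res => some res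
  | yi :: rest, res =>
    match pvInnerA tm f yi (PySem.List.pyRange (x + 1) (x + rx - 1) 1) res with
    | none => none
    | some r => pvOuterA tm f x rx rest r

def check (ry : Int) (rx : Int) (x : Int) (y : Int) (f : List (List Int)) : Int :=
  let t1 := (PySem.List.pyRange 0 ry 1).foldl (fun m yi => pvOMin m (pvCell f (yi + y) x)) none
  let t2 := (PySem.List.pyRange 0 rx 1).foldl (fun m xi => pvOMin m (pvCell f y (xi + x))) t1
  let t3 := (PySem.List.pyRange 0 ry 1).foldl (fun m yi => pvOMin m (pvCell f (yi + y) (x + rx - 1))) t2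
  let t4 := (PySem.List.pyRange 0 rx 1).foldl (fun m xi => pvOMin m (pvCell f (ry - 1 + y) (x + xi))) t3
  -- `.getD 0`: tmpmin can stay inf only when both ry ≤ 0 and rx ≤ 0, and then the interior
  -- loop below is empty, so the default is never compared or subtracted
  let tm := t4.getD 0
  match pvOuterA tm f x rx (PySem.List.pyRange (y + 1) (y + ry - 1) 1) 0 with
  | none => 0
  | some r => r

-- ===== PORT B =====
-- max(imax, v) with imax starting as None
def pvOMax (m : Option Int) (v : Int) : Option Int :=
  match m with
  | none => some v
  | some a => some (max a v)

-- is (yi, xi) a border cell of the rectangle [ylo..yhi] × [xlo..xhi]?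
def pvBorderQ (ylo yhi xlo xhi yi xi : Int) : Bool :=
  yi == ylo || yi == yhi || xi == xlo || xi == xhi

def check_alt (ry : Int) (rx : Int) (x : Int) (y : Int) (f : List (List Int)) : Int :=
  if ry ≤ 0 ∨ rx ≤ 0 then 0
  else
    -- one pass over the rectangle: state = (bmin, imax, total, cnt)
    let st := (PySem.List.pyRange y (y + ry) 1).foldl (fun s yi =>
        (PySem.List.pyRange x (x + rx) 1).foldl (fun (s : Option Int × Option Int × Int × Int) xi =>
          let v := pvCell f yi xi
          if pvBorderQ y (y + ry - 1) x (x + rx - 1) yi xi then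
            (pvOMin s.1 v, s.2.1, s.2.2.1, s.2.2.2)
          else
            (s.1, pvOMax s.2.1 v, s.2.2.1 + v, s.2.2.2 + 1)) s)
      ((none : Option Int), (none : Option Int), (0 : Int), (0 : Int))
    match st.1, st.2.1 with
    | some b, some mx => if b ≤ mx then 0 else b * st.2.2.2 - st.2.2.1
    | some b, none => b * st.2.2.2 - st.2.2.1
    | none, _ => 0   -- unreachable: the guard makes the rectangle nonempty, so bmin is set

-- ===== PRECONDITION & SPEC =====
-- f[i][j] raises no IndexError (wrap-aware, as Python indexes)
def pvOkB (f : List (List Int)) (i j : Int) : Bool :=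
  match PySem.List.pyGet? f i with
  | none => false
  | some row => decide (PySem.Raise.InRange row.length j)

-- Pre_check = exactly the inputs on which A raises no IndexError: every border access of its
-- four min-loops is in range (the interior accesses read the same rows between the same
-- columns, so they are in range too).  The two size bounds (ry ≤ 2·len f, rx ≤ 2·len f[y])
-- are already implied by the quantified access conditions — ry resp. rx consecutive indices
-- only fit in the valid wrap-aware index window [-len, len) if they hold — they are stated
-- first only so that deciding Pre_check never enumerates a range larger than the input.
def Pre_check (ry : Int) (rx : Int) (x : Int) (y : Int) (f : List (List Int)) : Prop :=
  (ry ≤ 0 ∨ (ry ≤ 2 * (f.length : Int) ∧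
     ∀ yi ∈ PySem.List.pyRange 0 ry 1, pvOkB f (yi + y) x = true ∧ pvOkB f (yi + y) (x + rx - 1) = true)) ∧
  (rx ≤ 0 ∨ (rx ≤ 2 * (((PySem.List.pyGet? f y).getD []).length : Int) ∧
     ∀ xi ∈ PySem.List.pyRange 0 rx 1, pvOkB f y (xi + x) = true ∧ pvOkB f (ry - 1 + y) (x + xi) = true))
instance (ry : Int) (rx : Int) (x : Int) (y : Int) (f : List (List Int)) : Decidable (Pre_check ry rx x y f) := by
  unfold Pre_check; infer_instance

def pvWitness_check : Int × Int × Int × Int × List (List Int) :=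
  (3, 3, 0, 0, [[1, 1, 1], [1, 0, 1], [1, 1, 1]])

def Spec_check (ry : Int) (rx : Int) (x : Int) (y : Int) (f : List (List Int)) (out : Int) : Prop := out = check_alt ry rx x y f
instance (ry : Int) (rx : Int) (x : Int) (y : Int) (f : List (List Int)) (out : Int) : Decidable (Spec_check ry rx x y f out) := by unfold Spec_check; infer_instance

-- ===== CLAIM (what is proved, stated in full; the proofs are below) =====
def Claim_equal_check : Prop := ∀ (ry : Int) (rx : Int) (x : Int) (y : Int) (f : List (List Int)), Dom_check ry rx x y f → Pre_check ry rx x y f → Spec_check ry rx x y f (check ry rx x y f)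

-- ===== LEMMAS AND PROOFS =====

-- running min/max over a list, started at a value
theorem pvOMin_foldl_some (t : List Int) (a : Int) :
    t.foldl pvOMin (some a) = some (t.foldl min a) := by
  induction t generalizing a with
  | nil => rfl
  | cons v rest ih => simpa [pvOMin] using ih (min a v)

theorem pvOMax_foldl_some (t : List Int) (a : Int) :
    t.foldl pvOMax (some a) = some (t.foldl max a) := by
  induction t generalizing a with
  | nil => rfl
  | cons v rest ih => simpa [pvOMax] using ih (max a v)

-- the None-seeded running min/max are List.min?/List.max?
theorem pvOMin_foldl_none (L : List Int) : L.foldl pvOMin none = L.min? := by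
  cases L with
  | nil => rfl
  | cons v t => simp [pvOMin, List.min?, pvOMin_foldl_some]

theorem pvOMax_foldl_none (L : List Int) : L.foldl pvOMax none = L.max? := by
  cases L with
  | nil => rfl
  | cons v t => simp [pvOMax, List.max?, pvOMax_foldl_some]

-- the fused inner loop = predicate pass + sum pass on the row's cells
theorem pvInnerA_spec (tm : Int) (f : List (List Int)) (yi : Int) (xs : List Int) (res : Int) :
    pvInnerA tm f yi xs res =
      (if (xs.map (fun xi => pvCell f yi xi)).any (fun v => tm ≤ v) then none
       else some ((xs.map (fun xi => pvCell f yi xi)).foldl (fun r v => r + (tm - v)) res)) := by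
  induction xs generalizing res with
  | nil => rfl
  | cons xi rest ih =>
    by_cases h : tm ≤ pvCell f yi xi
    · simp [pvInnerA, h]
    · simp [pvInnerA, h, ih]

-- the fused double loop = predicate pass + sum pass on the flattened interior
theorem pvOuterA_spec (tm : Int) (f : List (List Int)) (x rx : Int) (ys : List Int) (res : Int) :
    pvOuterA tm f x rx ys res =
      (if (ys.flatMap (fun yi => (PySem.List.pyRange (x + 1) (x + rx - 1) 1).map
              (fun xi => pvCell f yi xi))).any (fun v => tm ≤ v) then none
       else some ((ys.flatMap (fun yi => (PySem.List.pyRange (x + 1) (x + rx - 1) 1).map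
              (fun xi => pvCell f yi xi))).foldl (fun r v => r + (tm - v)) res)) := by
  induction ys generalizing res with
  | nil => rfl
  | cons yi rest ih =>
    rw [pvOuterA, pvInnerA_spec]
    by_cases h : ((PySem.List.pyRange (x + 1) (x + rx - 1) 1).map (fun xi => pvCell f yi xi)).any
        (fun v => tm ≤ v)
    · simp [h]
    · rw [if_neg h]
      simp only [ih]
      rw [List.flatMap_cons, List.any_append, List.foldl_append]
      rw [Bool.not_eq_true] at h
      rw [h, Bool.false_or]

-- reducing A's `return 0` match over the two-pass form
theorem pvMatchIf (c : Bool) (e : Int) :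
    (match (if c = true then (none : Option Int) else some e) with
     | none => 0
     | some z => z) = if c = true then 0 else e := by
  cases c <;> rfl

-- A's accumulation pass = the closed form a + tm * length - sum
theorem pvFoldSub (tm : Int) (I : List Int) (a : Int) :
    I.foldl (fun r v => r + (tm - v)) a = a + tm * (I.length : Int) - I.sum := by
  induction I generalizing a with
  | nil => simp
  | cons v t ih =>
    rw [List.foldl_cons, ih]
    simp only [List.length_cons, List.sum_cons]
    push_cast
    ring

-- B's inner fold over one row, split by the border predicate
theorem pvInnerB_spec (f : List (List Int)) (ylo yhi xlo xhi yi : Int) (xs : List Int)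
    (b m : Option Int) (t c : Int) :
    xs.foldl (fun (s : Option Int × Option Int × Int × Int) xi =>
        let v := pvCell f yi xi
        if pvBorderQ ylo yhi xlo xhi yi xi then (pvOMin s.1 v, s.2.1, s.2.2.1, s.2.2.2)
        else (s.1, pvOMax s.2.1 v, s.2.2.1 + v, s.2.2.2 + 1)) (b, m, t, c)
    = (((xs.filter (fun xi => pvBorderQ ylo yhi xlo xhi yi xi)).map (pvCell f yi)).foldl pvOMin b,
       ((xs.filter (fun xi => !pvBorderQ ylo yhi xlo xhi yi xi)).map (pvCell f yi)).foldl pvOMax m,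
       t + ((xs.filter (fun xi => !pvBorderQ ylo yhi xlo xhi yi xi)).map (pvCell f yi)).sum,
       c + (((xs.filter (fun xi => !pvBorderQ ylo yhi xlo xhi yi xi)).map (pvCell f yi)).length : Int)) := by
  induction xs generalizing b m t c with
  | nil => simp
  | cons xi rest ih =>
    by_cases h : pvBorderQ ylo yhi xlo xhi yi xi
    · simp [h, ih]
    · simp only [List.foldl_cons, List.filter_cons, h, Bool.not_false, Bool.false_eq_true,
        ite_false, ite_true, List.map_cons, List.foldl_cons, List.sum_cons, List.length_cons]
      rw [ih]
      simp only [Prod.mk.injEq]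
      refine ⟨trivial, trivial, by ring, by push_cast; ring⟩

-- B's whole rectangle fold: border min and interior max/sum/count over the flattened lists
theorem pvOuterB_spec (f : List (List Int)) (ylo yhi xlo xhi : Int) (cols : List Int)
    (ys : List Int) (b m : Option Int) (t c : Int) :
    ys.foldl (fun s yi =>
        cols.foldl (fun (s : Option Int × Option Int × Int × Int) xi =>
          let v := pvCell f yi xi
          if pvBorderQ ylo yhi xlo xhi yi xi then (pvOMin s.1 v, s.2.1, s.2.2.1, s.2.2.2)
          else (s.1, pvOMax s.2.1 v, s.2.2.1 + v, s.2.2.2 + 1)) s) (b, m, t, c)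
    = ((ys.flatMap (fun yi => (cols.filter (fun xi => pvBorderQ ylo yhi xlo xhi yi xi)).map (pvCell f yi))).foldl pvOMin b,
       (ys.flatMap (fun yi => (cols.filter (fun xi => !pvBorderQ ylo yhi xlo xhi yi xi)).map (pvCell f yi))).foldl pvOMax m,
       t + (ys.flatMap (fun yi => (cols.filter (fun xi => !pvBorderQ ylo yhi xlo xhi yi xi)).map (pvCell f yi))).sum,
       c + ((ys.flatMap (fun yi => (cols.filter (fun xi => !pvBorderQ ylo yhi xlo xhi yi xi)).map (pvCell f yi))).length : Int)) := by
  induction ys generalizing b m t c with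
  | nil => simp
  | cons yi rest ih =>
    rw [List.foldl_cons, pvInnerB_spec, ih]
    simp only [List.flatMap_cons, List.foldl_append, List.sum_append, List.length_append,
      Prod.mk.injEq]
    refine ⟨trivial, trivial, by ring, by push_cast; ring⟩

-- a middle row's interior strip: filtering the two border columns out of a full row
theorem pvColsFilter (x rx : Int) (hrx : 0 < rx) :
    (PySem.List.pyRange x (x + rx) 1).filter
        (fun xi => !(xi == x || xi == x + rx - 1)) = PySem.List.pyRange (x + 1) (x + rx - 1) 1 := by
  rcases lt_or_ge rx 2 with h1 | h2
  · have hx1 : rx = 1 := by omega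
    subst hx1
    have h3 : x + 1 - 1 = x := by omega
    rw [PySem.List.pyRange_one_singleton, h3,
        PySem.List.pyRange_one_eq_nil (by omega : x ≤ x + 1)]
    simp
  · rw [PySem.List.pyRange_one_append x (x + 1) (x + rx) (by omega) (by omega),
        PySem.List.pyRange_one_append (x + 1) (x + rx - 1) (x + rx) (by omega) (by omega),
        PySem.List.pyRange_one_singleton]
    rw [PySem.List.pyRange_one_cons (by omega : x + rx - 1 < x + rx),
        PySem.List.pyRange_one_eq_nil (a := x + rx - 1 + 1) (b := x + rx) (by omega)]
    rw [List.filter_append, List.filter_append]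
    have hmid : (PySem.List.pyRange (x + 1) (x + rx - 1) 1).filter
        (fun xi => !(xi == x || xi == x + rx - 1)) = PySem.List.pyRange (x + 1) (x + rx - 1) 1 := by
      apply List.filter_eq_self.mpr
      intro a ha
      rw [PySem.List.mem_pyRange_one] at ha
      have h1 : a ≠ x := by omega
      have h2 : a ≠ x + rx - 1 := by omega
      simp [h1, h2]
    rw [hmid]
    simp

-- B's interior value list is A's interior value list
theorem pvInteriorEq (ry rx x y : Int) (f : List (List Int)) (hry : 0 < ry) (hrx : 0 < rx) :
    (PySem.List.pyRange y (y + ry) 1).flatMap (fun yi =>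
        ((PySem.List.pyRange x (x + rx) 1).filter
          (fun xi => !pvBorderQ y (y + ry - 1) x (x + rx - 1) yi xi)).map (pvCell f yi))
    = (PySem.List.pyRange (y + 1) (y + ry - 1) 1).flatMap (fun yi =>
        (PySem.List.pyRange (x + 1) (x + rx - 1) 1).map (fun xi => pvCell f yi xi)) := by
  rcases lt_or_ge ry 2 with h1 | h2
  · have hy1 : ry = 1 := by omega
    subst hy1
    have h3 : y + 1 - 1 = y := by omega
    rw [PySem.List.pyRange_one_singleton, h3,
        PySem.List.pyRange_one_eq_nil (by omega : y ≤ y + 1)]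
    simp [pvBorderQ]
  · rw [PySem.List.pyRange_one_append y (y + 1) (y + ry) (by omega) (by omega),
        PySem.List.pyRange_one_append (y + 1) (y + ry - 1) (y + ry) (by omega) (by omega),
        PySem.List.pyRange_one_singleton]
    rw [PySem.List.pyRange_one_cons (by omega : y + ry - 1 < y + ry),
        PySem.List.pyRange_one_eq_nil (a := y + ry - 1 + 1) (b := y + ry) (by omega)]
    rw [List.flatMap_append, List.flatMap_append]
    have htop : ([y].flatMap (fun yi =>
        ((PySem.List.pyRange x (x + rx) 1).filter
          (fun xi => !pvBorderQ y (y + ry - 1) x (x + rx - 1) yi xi)).map (pvCell f yi))) = [] := by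
      simp [pvBorderQ]
    have hbot : ([y + ry - 1].flatMap (fun yi =>
        ((PySem.List.pyRange x (x + rx) 1).filter
          (fun xi => !pvBorderQ y (y + ry - 1) x (x + rx - 1) yi xi)).map (pvCell f yi))) = [] := by
      simp [pvBorderQ]
    rw [htop, hbot, List.nil_append, List.append_nil]
    apply List.flatMap_congr
    intro yi hyi
    rw [PySem.List.mem_pyRange_one] at hyi
    have hfil : (PySem.List.pyRange x (x + rx) 1).filter
        (fun xi => !pvBorderQ y (y + ry - 1) x (x + rx - 1) yi xi)
        = PySem.List.pyRange (x + 1) (x + rx - 1) 1 := by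
      rw [← pvColsFilter x rx hrx]
      apply List.filter_congr
      intro a _
      have hy : (yi == y) = false := by rw [beq_eq_false_iff_ne]; omega
      have hy' : (yi == y + ry - 1) = false := by rw [beq_eq_false_iff_ne]; omega
      simp [pvBorderQ, hy, hy']
    rw [hfil]

-- the two border value lists carry the same values
theorem pvBorderMem (ry rx x y : Int) (f : List (List Int)) (hry : 0 < ry) (hrx : 0 < rx)
    (v : Int) :
    (v ∈ (PySem.List.pyRange y (y + ry) 1).flatMap (fun yi =>
        ((PySem.List.pyRange x (x + rx) 1).filter
          (fun xi => pvBorderQ y (y + ry - 1) x (x + rx - 1) yi xi)).map (pvCell f yi)))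
    ↔ (v ∈ ((PySem.List.pyRange 0 ry 1).map (fun yi => pvCell f (yi + y) x)
        ++ ((PySem.List.pyRange 0 rx 1).map (fun xi => pvCell f y (xi + x))
        ++ ((PySem.List.pyRange 0 ry 1).map (fun yi => pvCell f (yi + y) (x + rx - 1))
        ++ (PySem.List.pyRange 0 rx 1).map (fun xi => pvCell f (ry - 1 + y) (x + xi)))))) := by
  simp only [List.mem_flatMap, List.mem_append, List.mem_map, List.mem_filter,
    PySem.List.mem_pyRange_one, pvBorderQ, Bool.or_eq_true, beq_iff_eq]
  constructor
  · rintro ⟨yi, hyi, xi, ⟨hxi, hcase⟩, rfl⟩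
    rcases hcase with ((h | h) | h) | h
    · subst h
      right; left
      refine ⟨xi - x, by omega, ?_⟩
      rw [show xi - x + x = xi by omega]
    · right; right; right
      refine ⟨xi - x, by omega, ?_⟩
      rw [show x + (xi - x) = xi by omega, show ry - 1 + y = yi by omega]
    · subst h
      left
      refine ⟨yi - y, by omega, ?_⟩
      rw [show yi - y + y = yi by omega]
    · right; right; left
      refine ⟨yi - y, by omega, ?_⟩
      rw [show yi - y + y = yi by omega, show x + rx - 1 = xi by omega]
  · rintro (⟨yi, hyi, rfl⟩ | ⟨xi, hxi, rfl⟩ | ⟨yi, hyi, rfl⟩ | ⟨xi, hxi, rfl⟩)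
    · exact ⟨yi + y, by omega, x, ⟨by omega, by omega⟩, rfl⟩
    · exact ⟨y, by omega, xi + x, ⟨by omega, by omega⟩, rfl⟩
    · exact ⟨yi + y, by omega, x + rx - 1, ⟨by omega, by omega⟩, rfl⟩
    · exact ⟨ry - 1 + y, by omega, x + xi, ⟨by omega, by omega⟩, rfl⟩

-- same values and both nonempty ⇒ same min?
theorem pvMinEqOfMemIff (L L' : List Int) (hm : ∀ v, v ∈ L ↔ v ∈ L') (hne : L ≠ []) :
    L.min? = L'.min? := by
  cases h : L.min? with
  | none => exact absurd (List.min?_eq_none_iff.mp h) hne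
  | some a =>
    obtain ⟨ha, hb⟩ := List.min?_eq_some_iff_subtype.mp h
    symm
    exact List.min?_eq_some_iff_subtype.mpr ⟨(hm a).mp ha, fun b hb' => hb b ((hm b).mpr hb')⟩

-- when ry ≤ 0 or rx ≤ 0, A's interior list is empty
theorem pvInteriorNilA (ry rx x y : Int) (f : List (List Int)) (h : ry ≤ 0 ∨ rx ≤ 0) :
    (PySem.List.pyRange (y + 1) (y + ry - 1) 1).flatMap (fun yi =>
        (PySem.List.pyRange (x + 1) (x + rx - 1) 1).map (fun xi => pvCell f yi xi)) = [] := by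
  rcases h with h | h
  · rw [PySem.List.pyRange_one_eq_nil (by omega : y + ry - 1 ≤ y + 1)]
    rfl
  · rw [PySem.List.pyRange_one_eq_nil (by omega : x + rx - 1 ≤ x + 1)]
    simp

-- the border-min fold of B's scan equals the border-min fold of A's four edge loops
theorem pvBorderMinEq (ry rx x y : Int) (f : List (List Int)) (hry : 0 < ry) (hrx : 0 < rx) :
    ((PySem.List.pyRange y (y + ry) 1).flatMap (fun yi =>
        ((PySem.List.pyRange x (x + rx) 1).filter
          (fun xi => pvBorderQ y (y + ry - 1) x (x + rx - 1) yi xi)).map (pvCell f yi))).foldl pvOMin none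
    = (((PySem.List.pyRange 0 ry 1).map (fun yi => pvCell f (yi + y) x)
        ++ ((PySem.List.pyRange 0 rx 1).map (fun xi => pvCell f y (xi + x))
        ++ ((PySem.List.pyRange 0 ry 1).map (fun yi => pvCell f (yi + y) (x + rx - 1))
        ++ (PySem.List.pyRange 0 rx 1).map (fun xi => pvCell f (ry - 1 + y) (x + xi)))))).foldl pvOMin none := by
  rw [pvOMin_foldl_none, pvOMin_foldl_none]
  apply pvMinEqOfMemIff
  · exact pvBorderMem ry rx x y f hry hrx
  · intro hnil
    have h0 : (0 : Int) ∈ PySem.List.pyRange 0 ry 1 := by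
      rw [PySem.List.mem_pyRange_one]; omega
    have hm : pvCell f (0 + y) x ∈ (PySem.List.pyRange y (y + ry) 1).flatMap (fun yi =>
        ((PySem.List.pyRange x (x + rx) 1).filter
          (fun xi => pvBorderQ y (y + ry - 1) x (x + rx - 1) yi xi)).map (pvCell f yi)) := by
      rw [pvBorderMem ry rx x y f hry hrx]
      simp only [List.mem_append, List.mem_map]
      exact Or.inl ⟨0, h0, rfl⟩
    rw [hnil] at hm
    exact absurd hm (List.not_mem_nil)

-- A's edge-loop value list is nonempty when 0 < ry, so its running min is some value
theorem pvLA_isSome (ry rx x y : Int) (f : List (List Int)) (hry : 0 < ry) :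
    ∃ b, (((PySem.List.pyRange 0 ry 1).map (fun yi => pvCell f (yi + y) x)
        ++ ((PySem.List.pyRange 0 rx 1).map (fun xi => pvCell f y (xi + x))
        ++ ((PySem.List.pyRange 0 ry 1).map (fun yi => pvCell f (yi + y) (x + rx - 1))
        ++ (PySem.List.pyRange 0 rx 1).map (fun xi => pvCell f (ry - 1 + y) (x + xi)))))).foldl pvOMin none
      = some b := by
  rw [pvOMin_foldl_none]
  cases h : (((PySem.List.pyRange 0 ry 1).map (fun yi => pvCell f (yi + y) x)
        ++ ((PySem.List.pyRange 0 rx 1).map (fun xi => pvCell f y (xi + x))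
        ++ ((PySem.List.pyRange 0 ry 1).map (fun yi => pvCell f (yi + y) (x + rx - 1))
        ++ (PySem.List.pyRange 0 rx 1).map (fun xi => pvCell f (ry - 1 + y) (x + xi)))))).min? with
  | some a => exact ⟨a, rfl⟩
  | none =>
    exfalso
    have hnil := List.min?_eq_none_iff.mp h
    rw [List.append_eq_nil_iff, List.map_eq_nil_iff] at hnil
    have h0 : (0 : Int) ∈ PySem.List.pyRange 0 ry 1 := by
      rw [PySem.List.mem_pyRange_one]; omega
    rw [hnil.1] at h0
    exact absurd h0 (List.not_mem_nil)

-- A = B on every input (the ports are totalized with in-range defaults; Pre_ is what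
-- guarantees the Python originals return at all)
theorem check_eq_alt (ry rx x y : Int) (f : List (List Int)) :
    check ry rx x y f = check_alt ry rx x y f := by
  simp only [check, check_alt]
  rw [pvOuterA_spec]
  have hmap : ∀ (g : Int → Int) (l : List Int) (m : Option Int),
      l.foldl (fun m i => pvOMin m (g i)) m = (l.map g).foldl pvOMin m := by
    intro g l m; rw [List.foldl_map]
  rw [hmap (fun yi => pvCell f (yi + y) x), hmap (fun xi => pvCell f y (xi + x)),
      hmap (fun yi => pvCell f (yi + y) (x + rx - 1)), hmap (fun xi => pvCell f (ry - 1 + y) (x + xi))]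
  simp only [← List.foldl_append]
  simp only [List.append_assoc]
  rw [pvMatchIf]
  by_cases hg : ry ≤ 0 ∨ rx ≤ 0
  · rw [if_pos hg, pvInteriorNilA ry rx x y f hg]
    simp
  · rw [if_neg hg]
    have hry : 0 < ry := by omega
    have hrx : 0 < rx := by omega
    rw [pvOuterB_spec, pvInteriorEq ry rx x y f hry hrx]
    obtain ⟨b, hb⟩ := pvLA_isSome ry rx x y f hry
    rw [pvBorderMinEq ry rx x y f hry hrx, hb]
    simp only [Option.getD_some]
    rw [pvOMax_foldl_none]
    cases hI : ((PySem.List.pyRange (y + 1) (y + ry - 1) 1).flatMap (fun yi =>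
        (PySem.List.pyRange (x + 1) (x + rx - 1) 1).map (fun xi => pvCell f yi xi))).max? with
    | none =>
      rw [List.max?_eq_none_iff.mp hI]
      simp
    | some mx =>
      obtain ⟨hmem, hub⟩ := List.max?_eq_some_iff.mp hI
      split
      next hc =>
        rw [List.any_eq_true] at hc
        obtain ⟨w, hw, hbw⟩ := hc
        have hcmp : b ≤ mx := le_trans (by simpa using hbw) (hub w hw)
        simp [hcmp]
      next hc =>
        have hcmp : ¬ b ≤ mx := fun h => hc (List.any_eq_true.mpr ⟨mx, hmem, by simpa using h⟩)
        rw [pvFoldSub]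
        simp [hcmp]

-- ===== VERDICT (by name: the statement is the Claim_ definition above) =====
theorem check_spec : Claim_equal_check := by
  intro ry rx x y f _ _
  unfold Spec_check
  exact check_eq_alt ry rx x y f
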